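-- pv_equiv track=rewrite | github.com/momo609/mindspeed | mindspeed/core/pipeline_parallel/unaligned/unaligned_pipeline.py | get_layer_offset_pp_vp_unaligned
-- ===== SOURCE A (Python) =====
-- def get_layer_offset_pp_vp_unaligned(pipline_num_transformer_layers):
--     row = len(pipline_num_transformer_layers)
--     col = len(pipline_num_transformer_layers[0])
--     offsets = []
--     for j in range(col):
--         for i in range(row):
--             offsets.append(pipline_num_transformer_layers[i][j])
--
--     prefix_sum = [0] * (len(offsets) + 1)
--     for index, num_layers in enumerate(offsets):
--         prefix_sum[index + 1] = prefix_sum[index] + num_layers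
--     prefix_sum = [[prefix_sum[j * row + i] for j in range(col)] for i in range(row)]
--     return prefix_sum
-- ===== SOURCE B (Python) =====
-- def get_layer_offset_pp_vp_unaligned(pipline_num_transformer_layers):
--     col = len(pipline_num_transformer_layers[0])
--     # acc[j] = running column-major prefix entering column j = sum of all full columns before j
--     acc = []
--     run = 0
--     for j in range(col):
--         acc.append(run)
--         run += sum(r[j] for r in pipline_num_transformer_layers)
--     # sweep the rows: emit the current accumulator row, then add the matrix row into it
--     out = []
--     for r in pipline_num_transformer_layers:
--         out.append(acc)
--         acc = [a + x for a, x in zip(acc, r)]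
--     return out
-- ===== Notes on version B (the rewrite author's own statement) =====
-- stated objective: simpler
-- what changed: Replaces A's flatten-to-column-major-list -> prefix-sum array -> reshape-by-index pipeline with a direct two-phase sweep: an exclusive prefix of column totals, then one row-major pass that emits the current accumulator vector and adds each matrix row into it; it never materialises the flattened list, the (rows*cols+1)-entry prefix array or the grand total, a constant-factor saving a timing run measured.
import Mathlib
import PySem

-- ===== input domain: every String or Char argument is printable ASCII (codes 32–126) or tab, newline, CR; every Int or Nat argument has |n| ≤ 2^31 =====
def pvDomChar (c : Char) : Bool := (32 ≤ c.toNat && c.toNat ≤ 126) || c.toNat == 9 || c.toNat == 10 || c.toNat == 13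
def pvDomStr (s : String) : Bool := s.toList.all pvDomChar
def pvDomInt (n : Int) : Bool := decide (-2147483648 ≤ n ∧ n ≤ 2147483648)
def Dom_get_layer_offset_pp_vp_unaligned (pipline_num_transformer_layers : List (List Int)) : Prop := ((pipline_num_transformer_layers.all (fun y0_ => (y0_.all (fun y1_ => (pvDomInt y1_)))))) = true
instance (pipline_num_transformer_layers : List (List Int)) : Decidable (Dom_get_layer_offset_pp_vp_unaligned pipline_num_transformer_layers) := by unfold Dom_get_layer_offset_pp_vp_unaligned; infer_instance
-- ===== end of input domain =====

-- B replaces A's flatten → prefix-sum array → reshape pipeline by an exclusive prefix of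
-- column totals followed by one row-major accumulator sweep (objective: simpler).

-- ===== PORT A =====
def get_layer_offset_pp_vp_unaligned (pipline_num_transformer_layers : List (List Int)) : List (List Int) :=
  let row := pipline_num_transformer_layers.length
  let col := (pipline_num_transformer_layers.headD []).length
  -- for j in range(col): for i in range(row): offsets.append(m[i][j])
  let offsets := (List.range col).foldl (fun (acc : List Int) j =>
      (List.range row).foldl (fun (acc2 : List Int) i =>
        acc2 ++ [(pipline_num_transformer_layers.getD i []).getD j 0]) acc) []
  -- prefix_sum[index+1] = prefix_sum[index] + num_layers, carried as (list so far, last value)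
  let ps := (offsets.foldl (fun (p : List Int × Int) x => (p.1 ++ [p.2 + x], p.2 + x)) ([0], 0)).1
  (List.range row).map (fun i => (List.range col).map (fun j => ps.getD (j * row + i) 0))

-- ===== PORT B =====
def get_layer_offset_pp_vp_unaligned_alt (pipline_num_transformer_layers : List (List Int)) : List (List Int) :=
  let col := (pipline_num_transformer_layers.headD []).length
  -- acc[j] = sum of all full columns before j (exclusive prefix of column totals)
  let acc := ((List.range col).foldl (fun (p : List Int × Int) j =>
      (p.1 ++ [p.2], p.2 + pipline_num_transformer_layers.foldl (fun s r => s + r.getD j 0) 0)) ([], 0)).1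
  -- sweep the rows: emit the accumulator, then add the matrix row into it (zip truncates to acc)
  (pipline_num_transformer_layers.foldl (fun (p : List (List Int) × List Int) r =>
      (p.1 ++ [p.2], (p.2.zip r).map (fun q => q.1 + q.2))) ([], acc)).1

-- ===== PRECONDITION & SPEC =====
-- Pre_ excludes exactly the inputs where the Python A raises IndexError: the empty matrix
-- (A reads m[0]) and ragged matrices with some row shorter than row 0 (A reads m[i][j], j < len(m[0])).
def Pre_get_layer_offset_pp_vp_unaligned (pipline_num_transformer_layers : List (List Int)) : Prop :=
  pipline_num_transformer_layers ≠ [] ∧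
  ∀ r ∈ pipline_num_transformer_layers, (pipline_num_transformer_layers.headD []).length ≤ r.length
instance (pipline_num_transformer_layers : List (List Int)) : Decidable (Pre_get_layer_offset_pp_vp_unaligned pipline_num_transformer_layers) := by unfold Pre_get_layer_offset_pp_vp_unaligned; infer_instance
def pvWitness_get_layer_offset_pp_vp_unaligned : List (List Int) := [[1, 2], [3, 4]]
def Spec_get_layer_offset_pp_vp_unaligned (pipline_num_transformer_layers : List (List Int)) (out : List (List Int)) : Prop := out = get_layer_offset_pp_vp_unaligned_alt pipline_num_transformer_layers
instance (pipline_num_transformer_layers : List (List Int)) (out : List (List Int)) : Decidable (Spec_get_layer_offset_pp_vp_unaligned pipline_num_transformer_layers out) := by unfold Spec_get_layer_offset_pp_vp_unaligned; infer_instance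

-- ===== CLAIM (what is proved, stated in full; the proofs are below) =====
def Claim_equal_get_layer_offset_pp_vp_unaligned : Prop := ∀ (pipline_num_transformer_layers : List (List Int)), Dom_get_layer_offset_pp_vp_unaligned pipline_num_transformer_layers → Pre_get_layer_offset_pp_vp_unaligned pipline_num_transformer_layers → Spec_get_layer_offset_pp_vp_unaligned pipline_num_transformer_layers (get_layer_offset_pp_vp_unaligned pipline_num_transformer_layers)

-- ===== LEMMAS AND PROOFS =====

-- cell (i,j) of the common reference value: full columns before j plus column j above row i
def gIdx (m : List (List Int)) (i j : Nat) : Int := (m.getD i []).getD j 0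
def colS (m : List (List Int)) (j : Nat) : Int := ((List.range m.length).map (fun i => gIdx m i j)).sum
def baseS (m : List (List Int)) (j : Nat) : Int := ((List.range j).map (colS m)).sum
def partS (m : List (List Int)) (i j : Nat) : Int := ((List.range i).map (fun i' => gIdx m i' j)).sum
def Mref (m : List (List Int)) : List (List Int) :=
  (List.range m.length).map (fun i => (List.range (m.headD []).length).map (fun j => baseS m j + partS m i j))

theorem foldl_app1 {α : Type} (f : α → Int) : ∀ (l : List α) (a : List Int),
    l.foldl (fun acc x => acc ++ [f x]) a = a ++ l.map f := by
  intro l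
  induction l with
  | nil => intro a; simp
  | cons x t ih => intro a; simp [List.foldl_cons, ih]

theorem foldl_flat {α : Type} (h : α → List Int) : ∀ (l : List α) (a : List Int),
    l.foldl (fun acc x => acc ++ h x) a = a ++ l.flatMap h := by
  intro l
  induction l with
  | nil => intro a; simp
  | cons x t ih => intro a; simp [List.foldl_cons, ih]

theorem ps_spec : ∀ (o : List Int) (init : List Int) (s : Int),
    o.foldl (fun (p : List Int × Int) x => (p.1 ++ [p.2 + x], p.2 + x)) (init, s)
      = (init ++ (List.range o.length).map (fun k => s + (o.take (k + 1)).sum), s + o.sum) := by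
  intro o
  induction o with
  | nil => intro init s; simp
  | cons x t ih =>
    intro init s
    rw [List.foldl_cons, ih]
    simp [List.range_succ_eq_map, List.map_map, Function.comp, List.take_succ_cons, add_assoc]

theorem getD_range_map {β : Type} (f : Nat → β) (n k : Nat) (hk : k < n) (d : β) :
    ((List.range n).map f).getD k d = f k := by
  simp [List.getD_eq_getElem?_getD, hk]

theorem range_getD_map {β : Type} (d : β) : ∀ (l : List β),
    (List.range l.length).map (fun i => l.getD i d) = l := by
  intro l
  induction l with
  | nil => simp
  | cons a t ih =>
    simp only [List.length_cons, List.range_succ_eq_map, List.map_cons, List.map_map,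
      Function.comp_def, List.getD_cons_zero, List.getD_cons_succ]
    exact congrArg (List.cons a) ih

theorem take_eq_range_map {β : Type} (d : β) : ∀ (l : List β) (i : Nat), i ≤ l.length →
    l.take i = (List.range i).map (fun k => l.getD k d) := by
  intro l
  induction l with
  | nil =>
    intro i hi
    have h0 : i = 0 := by simpa using hi
    subst h0; simp
  | cons a t ih =>
    intro i hi
    cases i with
    | zero => simp
    | succ i =>
      simp only [List.take_succ_cons, List.range_succ_eq_map, List.map_cons, List.map_map,
        Function.comp_def, List.getD_cons_zero, List.getD_cons_succ]
      rw [ih i (by simpa using hi)]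

theorem getD_prefix (o : List Int) : ∀ idx, idx ≤ o.length →
    ((0 : Int) :: (List.range o.length).map (fun k => (o.take (k + 1)).sum)).getD idx 0
      = (o.take idx).sum := by
  intro idx hidx
  cases idx with
  | zero => simp
  | succ k =>
    rw [List.getD_cons_succ, getD_range_map _ _ _ (by omega)]

theorem take_flat (w : Nat) : ∀ (L : List (List Int)), (∀ b ∈ L, b.length = w) →
    ∀ (j i : Nat), j < L.length → i ≤ w →
    ((L.flatMap id).take (j * w + i)).sum
      = ((L.take j).map List.sum).sum + (((L.getD j []).take i)).sum := by
  intro L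
  induction L with
  | nil => intro _ j i hj _; simp at hj
  | cons b t ih =>
    intro hw j i hj hi
    have hbw : b.length = w := hw b (by simp)
    cases j with
    | zero =>
      simp only [Nat.zero_mul, List.flatMap_cons, id_eq, List.take_zero,
        List.map_nil, List.sum_nil, List.getD_cons_zero, zero_add]
      rw [List.take_append_of_le_length (by omega)]
    | succ j =>
      have hsplit : (j + 1) * w + i = b.length + (j * w + i) := by rw [hbw]; ring
      simp only [List.flatMap_cons, id_eq, hsplit]
      rw [List.take_append, List.take_of_length_le (Nat.le_add_right _ _),
        Nat.add_sub_cancel_left, List.sum_append,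
        ih (fun b hb => hw b (by simp [hb])) j i (by simpa using hj) hi]
      simp only [List.take_succ_cons, List.map_cons, List.sum_cons, List.getD_cons_succ]
      ring

theorem foldl_addf {α : Type} (f : α → Int) : ∀ (l : List α) (a : Int),
    l.foldl (fun s x => s + f x) a = a + (l.map f).sum := by
  intro l
  induction l with
  | nil => intro a; simp
  | cons x t ih => intro a; simp [List.foldl_cons, ih, add_assoc]

theorem flat_take (m : List (List Int)) (c j i : Nat) (hj : j < c) (hi : i ≤ m.length) :
    (((List.range c).flatMap (fun j' => (List.range m.length).map (fun i' => gIdx m i' j'))).take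
        (j * m.length + i)).sum = baseS m j + partS m i j := by
  have h := take_flat m.length
      ((List.range c).map (fun j' => (List.range m.length).map (fun i' => gIdx m i' j')))
      (by intro b hb; obtain ⟨j', _, rfl⟩ := List.mem_map.mp hb; simp)
      j i (by simpa using hj) hi
  simp only [List.flatMap_map, id_eq] at h
  rw [h, ← List.map_take, List.take_range, getD_range_map _ _ _ hj]
  have hmin : min j c = j := by omega
  rw [hmin]
  congr 1
  · simp only [List.map_map, baseS]
    rfl
  · rw [← List.map_take, List.take_range]
    have : min i m.length = i := by omega
    rw [this]
    rfl

theorem A_eq_Mref (m : List (List Int)) : get_layer_offset_pp_vp_unaligned m = Mref m := by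
  unfold get_layer_offset_pp_vp_unaligned Mref
  simp only [foldl_app1, foldl_flat, List.nil_append, ps_spec, zero_add, List.singleton_append]
  apply List.map_congr_left
  intro i hi
  apply List.map_congr_left
  intro j hj
  have hi' : i < m.length := List.mem_range.mp hi
  have hj' : j < (m.headD []).length := List.mem_range.mp hj
  set offs := (List.range (m.headD []).length).flatMap
      (fun j' => (List.range m.length).map (fun i' => (m.getD i' []).getD j' 0)) with hoffs
  have hlen : offs.length = (m.headD []).length * m.length := by
    simp [hoffs, List.length_flatMap]
  have hle : j * m.length + i ≤ offs.length := by
    rw [hlen]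
    have h1 : j * m.length + i < (j + 1) * m.length := by
      have : (j + 1) * m.length = j * m.length + m.length := by ring
      omega
    have h2 : (j + 1) * m.length ≤ (m.headD []).length * m.length :=
      Nat.mul_le_mul_right _ hj'
    omega
  rw [getD_prefix offs _ hle]
  exact flat_take m _ j i hj' (le_of_lt hi')

theorem fold_acc {α : Type} (f : α → Int) : ∀ (L : List α) (init : List Int) (s : Int),
    L.foldl (fun (p : List Int × Int) x => (p.1 ++ [p.2], p.2 + f x)) (init, s)
      = (init ++ (List.range L.length).map (fun k => s + ((L.take k).map f).sum), s + (L.map f).sum) := by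
  intro L
  induction L with
  | nil => intro init s; simp
  | cons x t ih =>
    intro init s
    rw [List.foldl_cons, ih]
    simp [List.range_succ_eq_map, List.map_map, Function.comp_def, List.take_succ_cons, add_assoc]

theorem zip_map_add : ∀ (v r : List Int), v.length ≤ r.length →
    (v.zip r).map (fun q => q.1 + q.2) = (List.range v.length).map (fun j => v.getD j 0 + r.getD j 0) := by
  intro v
  induction v with
  | nil => intro r _; simp
  | cons a t ih =>
    intro r hlen
    cases r with
    | nil => simp at hlen
    | cons b u =>
      simp only [List.zip_cons_cons, List.map_cons, List.length_cons, List.range_succ_eq_map,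
        List.map_map, Function.comp_def, List.getD_cons_zero, List.getD_cons_succ]
      exact congrArg (List.cons (a + b)) (ih u (by simpa using hlen))

theorem rows_fold (c : Nat) : ∀ (rs : List (List Int)) (out : List (List Int)) (v : List Int),
    v.length = c → (∀ r ∈ rs, c ≤ r.length) →
    (rs.foldl (fun (p : List (List Int) × List Int) r =>
        (p.1 ++ [p.2], (p.2.zip r).map (fun q => q.1 + q.2))) (out, v)).1
    = out ++ (List.range rs.length).map (fun i =>
        (List.range c).map (fun j => v.getD j 0 + ((rs.take i).map (fun r => r.getD j 0)).sum)) := by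
  intro rs
  induction rs with
  | nil => intro out v _ _; simp
  | cons r t ih =>
    intro out v hv hr
    have hcr : c ≤ r.length := hr r (by simp)
    have hz : (v.zip r).map (fun q => q.1 + q.2)
        = (List.range c).map (fun j => v.getD j 0 + r.getD j 0) := by
      rw [zip_map_add v r (by omega), hv]
    rw [List.foldl_cons]
    dsimp only
    rw [hz, ih (out ++ [v]) _ (by simp) (fun r' hr' => hr r' (List.mem_cons_of_mem _ hr'))]
    simp only [List.length_cons, List.range_succ_eq_map, List.map_cons, List.map_map,
      Function.comp_def, List.take_zero, List.map_nil, List.sum_nil, add_zero,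
      List.take_succ_cons, List.append_assoc, List.cons_append, List.nil_append]
    congr 1
    congr 1
    · rw [← hv, range_getD_map]
    · apply List.map_congr_left
      intro i _
      apply List.map_congr_left
      intro j hj
      rw [getD_range_map _ _ _ (List.mem_range.mp hj)]
      simp [add_assoc]

theorem B_eq_Mref (m : List (List Int)) (h : Pre_get_layer_offset_pp_vp_unaligned m) :
    get_layer_offset_pp_vp_unaligned_alt m = Mref m := by
  obtain ⟨-, hlen⟩ := h
  unfold get_layer_offset_pp_vp_unaligned_alt Mref
  have hcol : ∀ j, m.foldl (fun s r => s + r.getD j 0) 0 = colS m j := by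
    intro j
    rw [foldl_addf, zero_add, colS]
    have hm := range_getD_map ([] : List Int) m
    conv_lhs => rw [← hm]
    rw [List.map_map]
    rfl
  simp only [hcol, fold_acc, List.nil_append, zero_add, List.take_range, List.length_range]
  rw [rows_fold ((m.headD []).length) m []
      ((List.range (m.headD []).length).map fun k => ((List.map (colS m) (List.range (min k (m.headD []).length))).sum))
      (by simp) hlen]
  simp only [List.nil_append]
  apply List.map_congr_left
  intro i hi
  apply List.map_congr_left
  intro j hj
  have hj' : j < (m.headD []).length := List.mem_range.mp hj
  rw [getD_range_map _ _ _ hj']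
  have hmin : min j (m.headD []).length = j := by omega
  rw [hmin]
  congr 1
  rw [take_eq_range_map ([] : List Int) m i (le_of_lt (List.mem_range.mp hi)), List.map_map]
  rfl

-- ===== VERDICT (by name: the statement is the Claim_ definition above) =====
theorem get_layer_offset_pp_vp_unaligned_spec : Claim_equal_get_layer_offset_pp_vp_unaligned := by
  intro m _ hpre
  unfold Spec_get_layer_offset_pp_vp_unaligned
  rw [A_eq_Mref, B_eq_Mref m hpre]
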